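-- pv_equiv track=rewrite | github.com/aniketkatkar2003/Universal-Code-Template-Generator-API | src/type_mappers.py | get_imports
-- ===== SOURCE A (Python) =====
-- from typing import Dict, List
--
-- def get_imports(dsl_types: List[str]) -> List[str]:
--     imports = set()
--
--     for dsl_type in dsl_types:
--         if 'List' in dsl_type or '[]' in dsl_type:
--             imports.add('from typing import List')
--         if 'Tree' in dsl_type:
--             imports.add('from typing import Optional')
--
--     return sorted(list(imports))
-- ===== SOURCE B (Python) =====
-- def get_imports(dsl_types):
--     imports = []
--     if any('List' in t or '[]' in t for t in dsl_types):
--         imports.append('from typing import List')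
--     if any('Tree' in t for t in dsl_types):
--         imports.append('from typing import Optional')
--     return imports
-- ===== Notes on version B (the rewrite author's own statement) =====
-- stated objective: simpler
-- what changed: Replaces the set accumulated element-by-element plus a final sort with two independent any(...) scans that append the two possible imports directly in their (already sorted) fixed order.
import Mathlib
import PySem

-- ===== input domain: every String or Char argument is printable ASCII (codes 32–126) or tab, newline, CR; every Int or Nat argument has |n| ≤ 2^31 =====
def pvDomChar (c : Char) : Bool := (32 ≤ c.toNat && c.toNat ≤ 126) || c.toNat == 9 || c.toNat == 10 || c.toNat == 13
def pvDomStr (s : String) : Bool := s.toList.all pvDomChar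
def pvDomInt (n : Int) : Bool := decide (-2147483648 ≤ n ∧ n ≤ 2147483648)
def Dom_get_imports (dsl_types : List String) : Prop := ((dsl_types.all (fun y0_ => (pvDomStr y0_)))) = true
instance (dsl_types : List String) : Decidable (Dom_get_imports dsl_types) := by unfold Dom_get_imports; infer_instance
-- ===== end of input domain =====

-- B replaces A's element-by-element set accumulation + final sort with two independent any-scans
-- appending the two possible imports in fixed (already sorted) order; objective: simpler.


-- ===== PORT A =====
-- one loop iteration of A: both membership tests, each adding its import to the set
def giStep (s : PySem.Set String) (dsl_type : String) : PySem.Set String :=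
  let s1 := if PySem.Str.isIn "List" dsl_type || PySem.Str.isIn "[]" dsl_type then
              PySem.Set.add s "from typing import List" else s
  if PySem.Str.isIn "Tree" dsl_type then
    PySem.Set.add s1 "from typing import Optional" else s1

def get_imports (dsl_types : List String) : List String :=
  let imports : PySem.Set String := dsl_types.foldl giStep PySem.Set.empty
  PySem.List.sorted imports (fun x => x) false

-- ===== PORT B =====
def get_imports_alt (dsl_types : List String) : List String :=
  (if dsl_types.any (fun t => PySem.Str.isIn "List" t || PySem.Str.isIn "[]" t) then
     ["from typing import List"] else []) ++
  (if dsl_types.any (fun t => PySem.Str.isIn "Tree" t) then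
     ["from typing import Optional"] else [])

-- ===== PRECONDITION & SPEC =====
def Spec_get_imports (dsl_types : List String) (out : List String) : Prop := out = get_imports_alt dsl_types
instance (dsl_types : List String) (out : List String) : Decidable (Spec_get_imports dsl_types out) := by unfold Spec_get_imports; infer_instance

-- ===== CLAIM (what is proved, stated in full; the proofs are below) =====
def Claim_equal_get_imports : Prop := ∀ (dsl_types : List String), Dom_get_imports dsl_types → Spec_get_imports dsl_types (get_imports dsl_types)

-- ===== LEMMAS AND PROOFS =====

theorem gi_mem_foldl (dsl_types : List String) (s : PySem.Set String) (x : String) :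
    x ∈ dsl_types.foldl giStep s ↔
      x ∈ s ∨
      (x = "from typing import List" ∧
        dsl_types.any (fun t => PySem.Str.isIn "List" t || PySem.Str.isIn "[]" t) = true) ∨
      (x = "from typing import Optional" ∧
        dsl_types.any (fun t => PySem.Str.isIn "Tree" t) = true) := by
  induction dsl_types generalizing s with
  | nil => simp
  | cons h tl ih =>
    simp only [List.foldl_cons, ih, giStep, List.any_cons, Bool.or_eq_true]
    split_ifs <;> simp_all [PySem.Set.mem_add] <;> aesop

theorem gi_nodup_foldl (dsl_types : List String) (s : PySem.Set String) (hs : s.Nodup) :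
    (dsl_types.foldl giStep s).Nodup := by
  induction dsl_types generalizing s with
  | nil => exact hs
  | cons h tl ih =>
    apply ih
    unfold giStep
    split_ifs <;> first
      | exact hs
      | exact PySem.Set.nodup_add _ _ hs
      | exact PySem.Set.nodup_add _ _ (PySem.Set.nodup_add _ _ hs)

theorem gi_alt_mem (dsl_types : List String) (x : String) :
    x ∈ get_imports_alt dsl_types ↔
      (x = "from typing import List" ∧
        dsl_types.any (fun t => PySem.Str.isIn "List" t || PySem.Str.isIn "[]" t) = true) ∨
      (x = "from typing import Optional" ∧
        dsl_types.any (fun t => PySem.Str.isIn "Tree" t) = true) := by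
  unfold get_imports_alt
  split_ifs <;> simp_all

theorem gi_alt_pairwise (dsl_types : List String) :
    (get_imports_alt dsl_types).Pairwise (· < ·) := by
  unfold get_imports_alt
  split_ifs <;> first | (simp; decide) | simp

theorem gi_alt_nodup (dsl_types : List String) : (get_imports_alt dsl_types).Nodup := by
  unfold get_imports_alt
  split_ifs <;> decide

-- ===== VERDICT (by name: the statement is the Claim_ definition above) =====
theorem get_imports_spec : Claim_equal_get_imports := by
  intro dsl_types _
  unfold Spec_get_imports get_imports
  have hperm : (get_imports_alt dsl_types).Perm (dsl_types.foldl giStep PySem.Set.empty) := by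
    rw [List.perm_ext_iff_of_nodup (gi_alt_nodup dsl_types)
      (gi_nodup_foldl dsl_types PySem.Set.empty (by simp [PySem.Set.empty]))]
    intro x
    rw [gi_alt_mem, gi_mem_foldl]
    simp [PySem.Set.empty]
  exact PySem.List.sorted_eq_of_perm_of_pairwise_lt _ _ (fun x => x) hperm (gi_alt_pairwise dsl_types)
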